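-- pv_equiv track=rewrite | github.com/snow-moonlight1/9-solver | version1.1/main.py | _find_best_split_pos
-- ===== SOURCE A (Python) =====
-- def _find_best_split_pos(tokens: list) -> int:
--     for i in reversed(range(len(tokens))):
--         if tokens[i] in {'*', '/'}:
--             return i
--     for i in reversed(range(len(tokens))):
--         if tokens[i] in {'+', '-'}:
--             return i
--     return -1
-- ===== SOURCE B (Python) =====
-- def _find_best_split_pos(tokens: list) -> int:
--     last_md = -1
--     last_as = -1
--     for i, t in enumerate(tokens):
--         if t in ('*', '/'):
--             last_md = i
--         elif t in ('+', '-'):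
--             last_as = i
--     return last_md if last_md != -1 else last_as
-- ===== Notes on version B (the rewrite author's own statement) =====
-- stated objective: alternative
-- what changed: Replaced the two reverse early-return index scans by a single forward pass that keeps the last seen mul/div and add/sub positions in two accumulators and decides at the end.
import Mathlib
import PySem

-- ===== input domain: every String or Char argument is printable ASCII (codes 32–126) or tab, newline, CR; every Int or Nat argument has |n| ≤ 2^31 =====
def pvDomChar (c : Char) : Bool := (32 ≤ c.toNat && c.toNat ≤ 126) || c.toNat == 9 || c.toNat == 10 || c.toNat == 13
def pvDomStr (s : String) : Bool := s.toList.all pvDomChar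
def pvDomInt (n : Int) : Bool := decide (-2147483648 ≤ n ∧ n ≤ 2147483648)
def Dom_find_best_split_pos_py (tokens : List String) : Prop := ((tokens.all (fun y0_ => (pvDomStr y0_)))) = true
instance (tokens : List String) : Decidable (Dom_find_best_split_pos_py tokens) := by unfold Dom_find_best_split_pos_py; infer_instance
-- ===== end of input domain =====

-- B replaces A's two reverse early-return scans by one forward pass with two last-seen accumulators (alternative decomposition, same cost).


-- ===== PORT A =====
-- one 'for i in reversed(range(len(tokens))): if p(tokens[i]): return i' loop
def pvScan (tokens : List String) (p : String → Bool) : List Int → Option Int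
  | [] => none
  | i :: rest => if p (PySem.List.pyGetD tokens i "") then some i else pvScan tokens p rest

def find_best_split_pos_py (tokens : List String) : Int :=
  -- reversed(range(len(tokens))) = range(len-1, -1, -1)
  let idxs := PySem.List.pyRange ((tokens.length : Int) - 1) (-1) (-1)
  match pvScan tokens (fun t => t == "*" || t == "/") idxs with
  | some i => i
  | none =>
    match pvScan tokens (fun t => t == "+" || t == "-") idxs with
    | some i => i
    | none => -1

-- ===== PORT B =====
def find_best_split_pos_py_alt (tokens : List String) : Int :=
  let st := (PySem.List.enumerate tokens 0).foldl
    (fun (s : Int × Int) (p : Int × String) =>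
      if p.2 == "*" || p.2 == "/" then (p.1, s.2)
      else if p.2 == "+" || p.2 == "-" then (s.1, p.1)
      else s) (-1, -1)
  if st.1 != -1 then st.1 else st.2

-- ===== PRECONDITION & SPEC =====
def Spec_find_best_split_pos_py (tokens : List String) (out : Int) : Prop := out = find_best_split_pos_py_alt tokens
instance (tokens : List String) (out : Int) : Decidable (Spec_find_best_split_pos_py tokens out) := by unfold Spec_find_best_split_pos_py; infer_instance

-- ===== CLAIM (what is proved, stated in full; the proofs are below) =====
def Claim_equal_find_best_split_pos_py : Prop := ∀ (tokens : List String), Dom_find_best_split_pos_py tokens → Spec_find_best_split_pos_py tokens (find_best_split_pos_py tokens)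

-- ===== LEMMAS AND PROOFS =====

-- B's loop body, named for the proofs
def pvStep (s : Int × Int) (p : Int × String) : Int × Int :=
  if p.2 == "*" || p.2 == "/" then (p.1, s.2)
  else if p.2 == "+" || p.2 == "-" then (s.1, p.1)
  else s

def pvFoldB (tokens : List String) : Int × Int :=
  (PySem.List.enumerate tokens 0).foldl pvStep (-1, -1)

def pvToOpt (m : Int) : Option Int := if m = -1 then none else some m

lemma pvScan_congr (xs ys : List String) (p : String → Bool) (idxs : List Int)
    (h : ∀ i ∈ idxs, PySem.List.pyGetD xs i "" = PySem.List.pyGetD ys i "") :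
    pvScan xs p idxs = pvScan ys p idxs := by
  induction idxs with
  | nil => rfl
  | cons i rest ih =>
    simp only [pvScan, h i (by simp)]
    rw [ih (fun j hj => h j (by simp [hj]))]

lemma pvScan_append (xs : List String) (t : String) (p : String → Bool) :
    pvScan (xs ++ [t]) p (PySem.List.pyRange ((xs.length : Int) + 1 - 1) (-1) (-1)) =
      if p t then some (xs.length : Int)
      else pvScan xs p (PySem.List.pyRange ((xs.length : Int) - 1) (-1) (-1)) := by
  have hlt : (-1 : Int) < (xs.length : Int) := by omega
  rw [show ((xs.length : Int) + 1 - 1) = (xs.length : Int) by ring,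
      PySem.List.pyRange_neg_one_cons hlt]
  have hget : PySem.List.pyGetD (xs ++ [t]) (xs.length : Int) "" = t := by
    rw [PySem.List.pyGetD_of_nonneg _ _ (by omega)]
    simp [List.getD]
  simp only [pvScan, hget]
  split
  · rfl
  · exact pvScan_congr _ _ _ _ (fun i hi => by
      rw [PySem.List.mem_pyRange_neg_one] at hi
      rw [PySem.List.pyGetD_of_nonneg _ _ (by omega),
          PySem.List.pyGetD_of_nonneg _ _ (by omega)]
      have : i.toNat < xs.length := by omega
      simp [List.getD, List.getElem?_append_left this])

lemma pvFoldB_append (xs : List String) (t : String) :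
    pvFoldB (xs ++ [t]) = pvStep (pvFoldB xs) ((xs.length : Int), t) := by
  unfold pvFoldB
  rw [PySem.List.enumerate_append, List.foldl_append]
  simp [PySem.List.enumerate]

lemma pvScan_eq_foldB (xs : List String) :
    pvScan xs (fun t => t == "*" || t == "/") (PySem.List.pyRange ((xs.length : Int) - 1) (-1) (-1)) = pvToOpt (pvFoldB xs).1 ∧
    pvScan xs (fun t => t == "+" || t == "-") (PySem.List.pyRange ((xs.length : Int) - 1) (-1) (-1)) = pvToOpt (pvFoldB xs).2 := by
  induction xs using List.reverseRecOn with
  | nil =>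
    rw [show ((List.length ([] : List String) : Int) - 1) = -1 by norm_num,
        PySem.List.pyRange_neg_one_eq_nil le_rfl]
    simp [pvScan, pvFoldB, PySem.List.enumerate, pvToOpt]
  | append_singleton ys t ih =>
    have hlen : ((ys ++ [t]).length : Int) = (ys.length : Int) + 1 := by simp
    rw [hlen, pvScan_append, pvScan_append, pvFoldB_append]
    by_cases h1 : (t == "*" || t == "/") = true
    · have h2 : (t == "+" || t == "-") = false := by
        rcases (by simpa using h1 : t = "*" ∨ t = "/") with h | h <;> simp [h]
      simp only [pvStep, h1, h2, if_true, Bool.false_eq_true, if_false]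
      refine ⟨?_, ih.2⟩
      simp only [pvToOpt]
      rw [if_neg (by omega)]
    · by_cases h2 : (t == "+" || t == "-") = true
      · simp only [pvStep, h1, h2, if_true, Bool.false_eq_true, if_false]
        refine ⟨ih.1, ?_⟩
        simp only [pvToOpt]
        rw [if_neg (by omega)]
      · simp only [pvStep, h1, h2, Bool.false_eq_true, if_false]
        exact ih

-- ===== VERDICT (by name: the statement is the Claim_ definition above) =====
theorem find_best_split_pos_py_spec : Claim_equal_find_best_split_pos_py := by
  intro tokens _
  unfold Spec_find_best_split_pos_py find_best_split_pos_py find_best_split_pos_py_alt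
  have h := pvScan_eq_foldB tokens
  have hmd := h.1
  have has := h.2
  have hB : (PySem.List.enumerate tokens 0).foldl
      (fun (s : Int × Int) (p : Int × String) =>
        if p.2 == "*" || p.2 == "/" then (p.1, s.2)
        else if p.2 == "+" || p.2 == "-" then (s.1, p.1)
        else s) (-1, -1) = pvFoldB tokens := rfl
  simp only [hmd, has, hB, pvToOpt]
  by_cases h1 : (pvFoldB tokens).1 = -1
  · simp only [h1]
    by_cases h2 : (pvFoldB tokens).2 = -1
    · simp [h2]
    · simp [h2]
  · simp [h1]
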